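-- pv_equiv track=rewrite | github.com/shakirovaleksandrrr/PPP_25-26_1sem | 1lab/main.py | count_cols_with_many_ones
-- ===== SOURCE A (Python) =====
-- def count_cols_with_many_ones(field):
--     # Подсчёт количества столбцов, где встречается более 3 единиц
--     if not field:
--         return 0
--
--     n = len(field)
--     m = len(field[0])
--     count = 0
--
--     for j in range(m):
--         ones = 0
--         for i in range(n):
--             ones += field[i][j]
--         if ones > 3:
--             count += 1
--
--     return count
-- ===== SOURCE B (Python) =====
-- def count_cols_with_many_ones(field):
--     # Divide and conquer: recursively split the row block in half, compute the
--     # column-sum vector of each half, and combine halves by elementwise addition.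
--     if not field:
--         return 0
--     m = len(field[0])
--
--     def colsums(rows):
--         if len(rows) == 1:
--             return [rows[0][j] for j in range(m)]
--         k = len(rows) // 2
--         return [x + y for x, y in zip(colsums(rows[:k]), colsums(rows[k:]))]
--
--     return sum(c > 3 for c in colsums(field))
-- ===== Notes on version B (the rewrite author's own statement) =====
-- stated objective: alternative
-- what changed: Replaces A's nested index loops (summing one column at a time over all rows) with a divide-and-conquer recursion that splits the rows in half, computes each half's column-sum vector, merges halves by elementwise vector addition, and finally counts entries > 3.
import Mathlib
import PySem

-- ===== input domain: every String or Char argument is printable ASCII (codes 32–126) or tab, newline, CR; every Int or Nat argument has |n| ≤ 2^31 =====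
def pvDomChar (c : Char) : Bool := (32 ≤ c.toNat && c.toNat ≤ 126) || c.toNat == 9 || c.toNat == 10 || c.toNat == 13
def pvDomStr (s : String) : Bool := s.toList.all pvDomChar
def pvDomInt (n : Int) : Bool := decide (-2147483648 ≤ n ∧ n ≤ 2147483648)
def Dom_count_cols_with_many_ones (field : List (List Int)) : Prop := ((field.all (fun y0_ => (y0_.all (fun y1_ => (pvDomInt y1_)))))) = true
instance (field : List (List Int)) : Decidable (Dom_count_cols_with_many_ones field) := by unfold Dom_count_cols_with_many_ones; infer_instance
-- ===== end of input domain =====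

-- B replaces A's nested index loops by a divide-and-conquer recursion over row blocks:
-- split in half, compute each half's column-sum vector, merge by elementwise addition,
-- then count entries > 3 (alternative decomposition, same asymptotic cost).

-- ===== PORT A =====
def count_cols_with_many_ones (field : List (List Int)) : Int :=
  if field = [] then 0
  else
    let n : Int := field.length
    let m : Int := (field.headD []).length
    (PySem.List.pyRange 0 m 1).foldl (fun count j =>
      let ones := (PySem.List.pyRange 0 n 1).foldl
        (fun ones i => ones + PySem.List.pyGetD (PySem.List.pyGetD field i []) j 0) 0
      if ones > 3 then count + 1 else count) 0

-- ===== PORT B =====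
-- colsums(rows); the [] branch is unreachable in Source B (colsums is only applied to
-- nonempty row blocks) and exists only as a totality guard.
def pvColsumsB (m : Int) (rows : List (List Int)) : List Int :=
  match rows with
  | [] => []
  | [r] => (PySem.List.pyRange 0 m 1).map (fun j => PySem.List.pyGetD r j 0)
  | a :: b :: t =>
      let k := (a :: b :: t).length / 2
      List.zipWith (· + ·) (pvColsumsB m ((a :: b :: t).take k))
        (pvColsumsB m ((a :: b :: t).drop k))
termination_by rows.length
decreasing_by
  · simp; omega
  · simp; omega

def count_cols_with_many_ones_alt (field : List (List Int)) : Int :=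
  if field = [] then 0
  else
    let m : Int := (field.headD []).length
    (pvColsumsB m field).foldl (fun acc c => acc + (if c > 3 then 1 else 0)) 0

-- ===== PRECONDITION & SPEC =====
-- Pre_ excludes ragged inputs with some row shorter than the first row, on which the
-- Python A (and B alike) raises IndexError.
def Pre_count_cols_with_many_ones (field : List (List Int)) : Prop :=
  ∀ row ∈ field, (field.headD []).length ≤ row.length
instance (field : List (List Int)) : Decidable (Pre_count_cols_with_many_ones field) := by
  unfold Pre_count_cols_with_many_ones; infer_instance
def pvWitness_count_cols_with_many_ones : List (List Int) :=
  [[1, 0], [1, 1], [1, 1], [1, 1], [1, 1]]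
def Spec_count_cols_with_many_ones (field : List (List Int)) (out : Int) : Prop := out = count_cols_with_many_ones_alt field
instance (field : List (List Int)) (out : Int) : Decidable (Spec_count_cols_with_many_ones field out) := by unfold Spec_count_cols_with_many_ones; infer_instance

-- ===== CLAIM (what is proved, stated in full; the proofs are below) =====
def Claim_equal_count_cols_with_many_ones : Prop := ∀ (field : List (List Int)), Dom_count_cols_with_many_ones field → Pre_count_cols_with_many_ones field → Spec_count_cols_with_many_ones field (count_cols_with_many_ones field)

-- ===== LEMMAS AND PROOFS =====

-- sum of column k over all rows, missing entries read as 0 (matching pyGetD's default)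
def pvColSum (field : List (List Int)) (k : Nat) : Int :=
  (field.map (fun row => row.getD k 0)).sum

theorem pvZipWith_add_map {α : Type} (f g : α → Int) :
    ∀ (l : List α), List.zipWith (· + ·) (l.map f) (l.map g) = l.map (fun x => f x + g x) := by
  intro l
  induction l with
  | nil => simp
  | cons x t ih => simp [ih]

theorem pvColSum_append (xs ys : List (List Int)) (k : Nat) :
    pvColSum (xs ++ ys) k = pvColSum xs k + pvColSum ys k := by
  simp [pvColSum]

-- the vector Source B's colsums builds is the list of all column sums
theorem pvColsums_eq (m : Nat) :
    ∀ (n : Nat) (rows : List (List Int)), rows.length = n → rows ≠ [] →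
      pvColsumsB (m : Int) rows = (List.range m).map (pvColSum rows) := by
  intro n
  induction n using Nat.strong_induction_on with
  | _ n ih =>
    intro rows hlen hne
    match rows with
    | [r] =>
      simp [pvColsumsB, PySem.List.pyRange_zero_natCast, List.map_map, pvColSum,
        Function.comp]
    | a :: b :: t =>
      rw [pvColsumsB]
      have hlen2 : (a :: b :: t).length = t.length + 2 := by simp
      set rows := a :: b :: t with hrows
      set k := rows.length / 2 with hk
      have hk1 : 1 ≤ k := by rw [hk, hlen2]; omega
      have hklt : k < rows.length := by rw [hk, hlen2]; omega
      have htake : (rows.take k).length = k := by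
        rw [List.length_take]; omega
      have hdrop : (rows.drop k).length = rows.length - k := by
        rw [List.length_drop]
      have h1 := ih (rows.take k).length (by omega) (rows.take k) rfl
        (by intro h; rw [h] at htake; simp at htake; omega)
      have h2 := ih (rows.drop k).length (by omega) (rows.drop k) rfl
        (by intro h; rw [h] at hdrop; simp at hdrop; omega)
      rw [h1, h2, pvZipWith_add_map]
      apply List.map_congr_left
      intro j _
      rw [← pvColSum_append, List.take_append_drop]

theorem pvFoldlSum (f : List Int → Int) :
    ∀ (l : List (List Int)) (a : Int),
      l.foldl (fun s r => s + f r) a = a + (l.map f).sum := by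
  intro l
  induction l with
  | nil => intro a; simp
  | cons r t ih => intro a; simp [List.foldl_cons, ih]; ring

-- counting '+1 on a hit' equals summing 0/1 indicators
theorem pvFoldlCount {α : Type} (p : α → Prop) [DecidablePred p] :
    ∀ (l : List α) (a : Int),
      l.foldl (fun c x => if p x then c + 1 else c) a =
        l.foldl (fun c x => c + if p x then 1 else 0) a := by
  intro l
  induction l with
  | nil => intro a; rfl
  | cons x t ih =>
    intro a
    simp only [List.foldl_cons]
    by_cases h : p x <;> simp [h, ih]

-- A's value, rewritten as a fold over natural column indices
theorem pvA_eq (field : List (List Int)) (h : field ≠ []) :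
    count_cols_with_many_ones field =
      (List.range (field.headD []).length).foldl
        (fun count k => if pvColSum field k > 3 then count + 1 else count) 0 := by
  unfold count_cols_with_many_ones
  rw [if_neg h]; simp only []
  have hinner : ∀ (j : Int),
      (PySem.List.pyRange 0 (field.length : Int) 1).foldl
        (fun ones i => ones + PySem.List.pyGetD (PySem.List.pyGetD field i []) j 0) 0 =
        (field.map (fun row => PySem.List.pyGetD row j 0)).sum := by
    intro j
    rw [PySem.List.foldl_pyRange_zero_pyGetD' field []
        (fun acc row => acc + PySem.List.pyGetD row j 0) 0,
      pvFoldlSum (fun row => PySem.List.pyGetD row j 0) field 0, zero_add]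
  simp only [hinner]
  rw [PySem.List.pyRange_zero_natCast ((field.headD []).length), List.foldl_map]
  simp [pvColSum]

-- B's value, rewritten the same way
theorem pvB_eq (field : List (List Int)) (h : field ≠ []) :
    count_cols_with_many_ones_alt field =
      (List.range (field.headD []).length).foldl
        (fun count k => if pvColSum field k > 3 then count + 1 else count) 0 := by
  unfold count_cols_with_many_ones_alt
  rw [if_neg h]; simp only []
  rw [pvColsums_eq (field.headD []).length field.length field rfl h, List.foldl_map,
    pvFoldlCount (fun k => pvColSum field k > 3) (List.range (field.headD []).length) 0]

theorem count_cols_with_many_ones_spec : Claim_equal_count_cols_with_many_ones := by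
  intro field _ _
  unfold Spec_count_cols_with_many_ones
  by_cases h : field = []
  · subst h; rfl
  · rw [pvA_eq field h, pvB_eq field h]
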